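-- pv_equiv track=rewrite | github.com/suriya4code/blind_leetcode_python | 41_biggest_house.py | solve
-- ===== SOURCE A (Python) =====
-- def solve(h):
--     n = len(h)
--     mr  = [h[-1]]
--     for i in range(n-2,-1,-1):
--         mr.insert(0,max(h[i],mr[0]))
--
--     res = []
--     for j in range(n):
--         if h[j] == mr[j]:
--             res.append(0)
--         else:
--             res.append(mr[j]-h[j]+1)
--     return res
-- ===== SOURCE B (Python) =====
-- def solve(h):
--     cur = h[-1]
--     res = []
--     for x in reversed(h):
--         if x > cur:
--             cur = x
--         res.append(0 if x == cur else cur - x + 1)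
--     res.reverse()
--     return res
-- ===== Notes on version B (the rewrite author's own statement) =====
-- stated objective: faster
-- what changed: Replaces A's build-the-whole-suffix-max-array (via quadratic insert-at-front) plus a second indexed scan with one fused backward pass keeping only a scalar running maximum, reversing the result at the end.
import Mathlib
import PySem

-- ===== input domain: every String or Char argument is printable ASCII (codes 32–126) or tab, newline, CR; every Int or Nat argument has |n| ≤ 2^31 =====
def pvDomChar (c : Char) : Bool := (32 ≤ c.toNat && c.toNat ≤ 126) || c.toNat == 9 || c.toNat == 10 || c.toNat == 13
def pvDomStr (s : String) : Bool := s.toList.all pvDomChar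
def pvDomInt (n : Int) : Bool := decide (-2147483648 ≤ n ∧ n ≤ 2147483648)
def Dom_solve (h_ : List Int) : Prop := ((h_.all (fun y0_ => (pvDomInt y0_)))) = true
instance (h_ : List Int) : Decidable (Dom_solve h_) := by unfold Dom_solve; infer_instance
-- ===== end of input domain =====

-- B replaces A's two passes (build the full suffix-max array, then rescan) by one fused
-- backward pass keeping only a scalar running maximum (objective: faster; A's insert at the front is quadratic).

-- ===== PORT A =====
def solve (h_ : List Int) : List Int :=
  let n : Int := PySem.List.len h_
  let mr : List Int :=
    (PySem.List.pyRange (n - 2) (-1) (-1)).foldl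
      (fun mr i =>
        PySem.List.insert mr 0 (max (PySem.List.pyGetD h_ i 0) (PySem.List.pyGetD mr 0 0)))
      [PySem.List.pyGetD h_ (-1) 0]
  (PySem.List.pyRange 0 n 1).foldl
    (fun res j =>
      if PySem.List.pyGetD h_ j 0 = PySem.List.pyGetD mr j 0 then res ++ [0]
      else res ++ [PySem.List.pyGetD mr j 0 - PySem.List.pyGetD h_ j 0 + 1])
    []

-- ===== PORT B =====
def solve_alt (h_ : List Int) : List Int :=
  let cur0 : Int := PySem.List.pyGetD h_ (-1) 0
  let p : List Int × Int :=
    h_.reverse.foldl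
      (fun (p : List Int × Int) x =>
        let cur := if x > p.2 then x else p.2
        (p.1 ++ [if x = cur then 0 else cur - x + 1], cur))
      ([], cur0)
  p.1.reverse

-- ===== PRECONDITION & SPEC =====
-- Pre_ excludes only the empty list, on which A raises IndexError when indexing the last element.
def Pre_solve (h_ : List Int) : Prop := h_ ≠ []
instance (h_ : List Int) : Decidable (Pre_solve h_) := by unfold Pre_solve; infer_instance
def pvWitness_solve : List Int := ([3, 1, 4])
def Spec_solve (h_ : List Int) (out : List Int) : Prop := out = solve_alt h_
instance (h_ : List Int) (out : List Int) : Decidable (Spec_solve h_ out) := by unfold Spec_solve; infer_instance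

-- ===== CLAIM (what is proved, stated in full; the proofs are below) =====
def Claim_equal_solve : Prop := ∀ (h_ : List Int), Dom_solve h_ → Pre_solve h_ → Spec_solve h_ (solve h_)

-- ===== LEMMAS AND PROOFS =====

-- the per-position output value, given the height x and the suffix max m at that position
def chunk (x m : Int) : Int := if x = m then 0 else m - x + 1

-- suffix maxima of a list, with seed c past the right end
def mrS : List Int → Int → List Int
  | [], _ => []
  | x :: xs, c => (max x ((mrS xs c).headD c)) :: mrS xs c

-- B's fused pass as a structural recursion (on the reversed list)
def bfold : List Int → Int → List Int
  | [], _ => []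
  | x :: xs, c => chunk x (max c x) :: bfold xs (max c x)

theorem length_mrS (h : List Int) (c : Int) : (mrS h c).length = h.length := by
  induction h with
  | nil => rfl
  | cons x xs ih => simp [mrS, ih]

theorem mrS_ne_nil (h : List Int) (c : Int) (hne : h ≠ []) : mrS h c ≠ [] := by
  cases h with
  | nil => exact absurd rfl hne
  | cons x xs => simp [mrS]

theorem mrS_append_singleton (ys : List Int) (x c : Int) :
    mrS (ys ++ [x]) c = mrS ys (max x c) ++ [max x c] := by
  induction ys with
  | nil => simp [mrS]
  | cons y t ih =>
    simp only [List.cons_append, mrS, ih]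
    congr 1
    cases t with
    | nil => simp [mrS]
    | cons z t' => simp [mrS]

theorem bfold_foldl (r : List Int) (c : Int) (acc : List Int) :
    (r.foldl
      (fun (p : List Int × Int) x =>
        let cur := if x > p.2 then x else p.2
        (p.1 ++ [if x = cur then 0 else cur - x + 1], cur))
      (acc, c)).1 = acc ++ bfold r c := by
  induction r generalizing c acc with
  | nil => simp [bfold]
  | cons x xs ih =>
    simp only [List.foldl_cons, bfold]
    have hmax : (if x > c then x else c) = max c x := by
      rcases le_or_gt x c with h | h
      · simp [max_eq_left h, not_lt.mpr h]
      · simp [max_eq_right (le_of_lt h), h]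
    rw [hmax, ih]
    simp [chunk, List.append_assoc]

theorem bfold_eq_zipWith (r : List Int) (c : Int) :
    (bfold r c).reverse = List.zipWith chunk r.reverse (mrS r.reverse c) := by
  induction r generalizing c with
  | nil => simp [bfold, mrS]
  | cons x xs ih =>
    simp only [bfold, List.reverse_cons, mrS_append_singleton]
    rw [List.zipWith_append (h := by simp [length_mrS])]
    rw [max_comm x c] at *
    simp [ih, chunk]

-- A's first loop computes mrS
theorem loopA (h : List Int) (c : Int) (j : Nat) (hj : j < h.length) :
    (PySem.List.pyRange ((j : Int) - 1) (-1) (-1)).foldl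
      (fun mr i =>
        PySem.List.insert mr 0 (max (PySem.List.pyGetD h i 0) (PySem.List.pyGetD mr 0 0)))
      (mrS (h.drop j) c) = mrS h c := by
  induction j with
  | zero =>
    rw [PySem.List.pyRange_neg_one_eq_nil (by norm_num)]
    simp
  | succ j ih =>
    have hj' : j < h.length := Nat.lt_of_succ_lt hj
    have hcast : ((j : Int) + 1 - 1) = (j : Int) := by ring
    have hcons : PySem.List.pyRange ((j : Int)) (-1) (-1)
        = (j : Int) :: PySem.List.pyRange ((j : Int) - 1) (-1) (-1) :=
      PySem.List.pyRange_neg_one_cons (by omega)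
    have hdropne : h.drop (j + 1) ≠ [] := by
      intro hnil
      have := List.drop_eq_nil_iff.mp hnil
      omega
    have hdrop : h.drop j = h[j] :: h.drop (j + 1) := List.drop_eq_getElem_cons hj'
    have hstep :
        PySem.List.insert (mrS (h.drop (j + 1)) c) 0
          (max (PySem.List.pyGetD h (j : Int) 0)
               (PySem.List.pyGetD (mrS (h.drop (j + 1)) c) 0 0))
          = mrS (h.drop j) c := by
      rw [PySem.List.insert_zero, hdrop]
      simp only [mrS]
      congr 2
      · rw [PySem.List.pyGetD_natCast]
        simp [List.getD_eq_getElem?_getD, hj']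
      · rw [PySem.List.pyGetD_zero]
        rcases List.exists_cons_of_ne_nil (mrS_ne_nil _ c hdropne) with ⟨a, t, hm⟩
        simp [hm]
    push_cast
    rw [hcast, hcons, List.foldl_cons, hstep]
    exact ih hj'

-- A's second loop is a map over indices; fold it away
theorem foldl_if_append (P : Int → Prop) [DecidablePred P] (g : Int → Int)
    (xs : List Int) (acc : List Int) :
    xs.foldl (fun res j => if P j then res ++ [0] else res ++ [g j]) acc
      = acc ++ xs.map (fun j => if P j then 0 else g j) := by
  induction xs generalizing acc with
  | nil => simp
  | cons x t ih => by_cases hx : P x <;> simp [hx, ih, List.append_assoc]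

theorem map_range_chunk (as bs : List Int) (hlen : bs.length = as.length) :
    (List.range as.length).map
        (fun k => chunk (as.getD k 0) (bs.getD k 0)) = List.zipWith chunk as bs := by
  induction as generalizing bs with
  | nil => simp
  | cons a t ih =>
    cases bs with
    | nil => simp at hlen
    | cons b u =>
      simp only [List.length_cons, List.range_succ_eq_map, List.map_cons, List.map_map]
      simp only [List.getD_cons_zero, List.zipWith_cons_cons]
      congr 1
      · rw [← ih u (by simpa using hlen)]
        apply List.map_congr_left
        intro k _
        simp

theorem solve_eq_zip (h : List Int) (hne : h ≠ []) :
    solve h = List.zipWith chunk h (mrS h (h.getLast hne)) := by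
  have hn : 0 < h.length := List.length_pos_iff.mpr hne
  have hlast : PySem.List.pyGetD h (-1) 0 = h.getLast hne := PySem.List.pyGetD_neg_one (xs := h) 0 hne
  have hdrop : h.drop (h.length - 1) = [h.getLast hne] := by
    rw [List.drop_length_sub_one hne]
  have hseed : mrS (h.drop (h.length - 1)) (h.getLast hne) = [h.getLast hne] := by
    rw [hdrop]; simp [mrS]
  have hmr :
      (PySem.List.pyRange ((PySem.List.len h) - 2) (-1) (-1)).foldl
        (fun mr i =>
          PySem.List.insert mr 0 (max (PySem.List.pyGetD h i 0) (PySem.List.pyGetD mr 0 0)))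
        [PySem.List.pyGetD h (-1) 0] = mrS h (h.getLast hne) := by
    have hcast : (PySem.List.len h) - 2 = ((h.length - 1 : Nat) : Int) - 1 := by
      simp [PySem.List.len_eq]; omega
    rw [hcast, hlast, ← hseed]
    exact loopA h (h.getLast hne) (h.length - 1) (by omega)
  show (PySem.List.pyRange 0 (PySem.List.len h) 1).foldl _ [] = _
  rw [hmr, foldl_if_append (fun j => PySem.List.pyGetD h j 0 = PySem.List.pyGetD (mrS h (h.getLast hne)) j 0)]
  rw [List.nil_append]
  rw [PySem.List.len_eq, PySem.List.pyRange_zero_natCast, List.map_map]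
  rw [← map_range_chunk h (mrS h (h.getLast hne)) (length_mrS h _)]
  apply List.map_congr_left
  intro k _
  simp [chunk, PySem.List.pyGetD_natCast, Function.comp]

theorem solve_alt_eq_zip (h : List Int) (hne : h ≠ []) :
    solve_alt h = List.zipWith chunk h (mrS h (h.getLast hne)) := by
  have hlast : PySem.List.pyGetD h (-1) 0 = h.getLast hne := PySem.List.pyGetD_neg_one (xs := h) 0 hne
  show (h.reverse.foldl _ ([], PySem.List.pyGetD h (-1) 0)).1.reverse = _
  rw [hlast, bfold_foldl, List.nil_append, bfold_eq_zipWith, List.reverse_reverse]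

-- ===== VERDICT (by name: the statement is the Claim_ definition above) =====
theorem solve_spec : Claim_equal_solve := by
  intro h_ _ hpre
  unfold Spec_solve
  rw [solve_eq_zip h_ hpre, solve_alt_eq_zip h_ hpre]
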